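-- pv_equiv track=rewrite | github.com/OpenwaterHealth/OpenLIFU-python | src/openlifu/nav/photoscan.py | _make_pairs_sequential_loop
-- ===== SOURCE A (Python) =====
-- from typing import Annotated, Any, Callable, Dict, List, Tuple
--
-- def _make_pairs_sequential_loop(view_ids: List[Any], window_radius: int | None = None) -> List[List[Any]]:
--     """
--     Generate image match pairs from a list of view IDs. Assumes view_ids are sequential and
--     wrap around. Each view is matched with the `window_radius` views before and after it.
--     If `window_radius` is None or large enough to cover all views, exhaustive matching is used.
--
--     Args:
--         view_ids (List[str]): Ordered list of view identifiers.
--         window_radius (Optional[int]): Number of neighbors to match on each side.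
--
--     Returns:
--         rows (List[List[str]]): Each row is of the form [src, tgt1, tgt2, ...], meaning src
--                                 is matched to tgt1, tgt2, etc.
--     """
--     num_views = len(view_ids)
--
--     if window_radius is None or 2*window_radius + 1 >= num_views:
--         rows = [[view_ids[i] for i in range(j, num_views)] for j in range(num_views)]
--     else:
--         rows = []
--         for i in range(num_views):
--             rows.append([view_ids[i]])
--             for j in range(window_radius):
--                 k =  i+j+1
--                 if k < num_views:
--                     rows[i].append(view_ids[k])
--                 else:
--                     rows[k % num_views].append(view_ids[i])
--     rows = rows[:-1]
--     return rows
-- ===== SOURCE B (Python) =====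
-- from typing import Any, List
--
-- def _make_pairs_sequential_loop(view_ids: List[Any], window_radius: int | None = None) -> List[List[Any]]:
--     n = len(view_ids)
--     if window_radius is None or 2*window_radius + 1 >= n:
--         rows = [view_ids[j:] for j in range(n)]
--     else:
--         w = window_radius
--         rows = []
--         for r in range(n):
--             fwd = view_ids[r+1 : r+1+max(0, min(w, n-1-r))]
--             wrapped = view_ids[n-(w-r) : n] if r < w else []
--             rows.append([view_ids[r]] + fwd + wrapped)
--     return rows[:-1]
-- ===== Notes on version B (the rewrite author's own statement) =====
-- stated objective: alternative
-- what changed: A builds the windowed rows by mutating earlier rows mid-loop (wrap-around neighbors are appended to previously created rows); B computes each row independently in one pass from a closed-form index window: the row for r is [v[r]] + a forward slice v[r+1 : r+1+max(0,min(w,n-1-r))] + a wrapped slice v[n-(w-r):n] for r < w, and the exhaustive branch uses suffix slices instead of a nested comprehension.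
import Mathlib
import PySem

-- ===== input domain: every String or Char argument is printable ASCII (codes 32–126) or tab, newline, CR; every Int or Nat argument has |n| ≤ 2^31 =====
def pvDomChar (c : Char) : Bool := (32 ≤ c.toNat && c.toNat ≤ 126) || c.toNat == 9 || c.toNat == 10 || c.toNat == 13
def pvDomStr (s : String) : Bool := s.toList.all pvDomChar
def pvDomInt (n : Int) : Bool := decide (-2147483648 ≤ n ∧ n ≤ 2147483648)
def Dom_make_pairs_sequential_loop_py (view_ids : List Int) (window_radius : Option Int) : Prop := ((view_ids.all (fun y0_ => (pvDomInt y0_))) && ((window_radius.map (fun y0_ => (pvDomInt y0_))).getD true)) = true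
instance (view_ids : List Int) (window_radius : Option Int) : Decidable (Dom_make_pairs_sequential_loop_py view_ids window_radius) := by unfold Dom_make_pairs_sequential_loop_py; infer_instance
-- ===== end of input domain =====

-- B builds each windowed row independently from closed-form slices (forward window + wrapped
-- window) instead of A's mid-loop mutation of earlier rows; same cost, different decomposition.

-- ===== PORT A =====
-- Python `rows[k].append(x)`: every index A reaches satisfies 0 ≤ k < len(rows), where toNat is exact
def pvAppendAt (rows : List (List Int)) (k : Int) (x : Int) : List (List Int) :=
  rows.modify k.toNat (fun row => row ++ [x])

def make_pairs_sequential_loop_py (view_ids : List Int) (window_radius : Option Int) : List (List Int) :=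
  let num_views : Int := (view_ids.length : Int)
  let rows : List (List Int) :=
    if (match window_radius with
        | none => true
        | some w => decide (2 * w + 1 ≥ num_views)) then
      (PySem.List.pyRange 0 num_views 1).map (fun j =>
        (PySem.List.pyRange j num_views 1).map (fun i => PySem.List.pyGetD view_ids i 0))
    else
      let w : Int := window_radius.getD 0
      (PySem.List.pyRange 0 num_views 1).foldl (fun rows i =>
        let rows := rows ++ [[PySem.List.pyGetD view_ids i 0]]
        (PySem.List.pyRange 0 w 1).foldl (fun rows j =>
          let k := i + j + 1
          if k < num_views then
            pvAppendAt rows i (PySem.List.pyGetD view_ids k 0)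
          else
            pvAppendAt rows (PySem.Int.mod k num_views) (PySem.List.pyGetD view_ids i 0)) rows) []
  PySem.List.slice rows none (some (-1))

-- ===== PORT B =====
def make_pairs_sequential_loop_py_alt (view_ids : List Int) (window_radius : Option Int) : List (List Int) :=
  let n : Int := (view_ids.length : Int)
  let rows : List (List Int) :=
    if (match window_radius with
        | none => true
        | some w => decide (2 * w + 1 ≥ n)) then
      (PySem.List.pyRange 0 n 1).map (fun j => PySem.List.slice view_ids (some j) none)
    else
      let w : Int := window_radius.getD 0
      (PySem.List.pyRange 0 n 1).foldl (fun rows r =>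
        let fwd := PySem.List.slice view_ids (some (r + 1)) (some (r + 1 + max 0 (min w (n - 1 - r))))
        let wrapped := if r < w then PySem.List.slice view_ids (some (n - (w - r))) (some n) else []
        rows ++ [[PySem.List.pyGetD view_ids r 0] ++ fwd ++ wrapped]) []
  PySem.List.slice rows none (some (-1))

-- ===== PRECONDITION & SPEC =====
def Spec_make_pairs_sequential_loop_py (view_ids : List Int) (window_radius : Option Int) (out : List (List Int)) : Prop := out = make_pairs_sequential_loop_py_alt view_ids window_radius
instance (view_ids : List Int) (window_radius : Option Int) (out : List (List Int)) : Decidable (Spec_make_pairs_sequential_loop_py view_ids window_radius out) := by unfold Spec_make_pairs_sequential_loop_py; infer_instance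

-- ===== CLAIM (what is proved, stated in full; the proofs are below) =====
def Claim_equal_make_pairs_sequential_loop_py : Prop := ∀ (view_ids : List Int) (window_radius : Option Int), Dom_make_pairs_sequential_loop_py view_ids window_radius → Spec_make_pairs_sequential_loop_py view_ids window_radius (make_pairs_sequential_loop_py view_ids window_radius)

-- ===== LEMMAS AND PROOFS =====

-- values of view_ids over an index range
def pvMapV (vs : List Int) (a b : Int) : List Int :=
  (PySem.List.pyRange a b 1).map (fun t => PySem.List.pyGetD vs t 0)

-- the row for source r, with wrapped contributions collected from outer iterations < s
def pvRow (vs : List Int) (n w r s : Int) : List Int :=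
  PySem.List.pyGetD vs r 0 ::
    (pvMapV vs (r + 1) (min (r + w + 1) n) ++ pvMapV vs (n + r - w) s)

theorem pvMapV_empty (vs : List Int) {a b : Int} (h : b ≤ a) : pvMapV vs a b = [] := by
  simp [pvMapV, PySem.List.pyRange_one_eq_nil h]

theorem pvMapV_snoc (vs : List Int) {a b : Int} (h : a ≤ b) :
    pvMapV vs a (b + 1) = pvMapV vs a b ++ [PySem.List.pyGetD vs b 0] := by
  simp [pvMapV, PySem.List.pyRange_one_succ_right h]

theorem pvMapV_congr (vs : List Int) {a b b' : Int} (h : (b - a).toNat = (b' - a).toNat) :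
    pvMapV vs a b = pvMapV vs a b' := by
  simp [pvMapV, PySem.List.pyRange_one, h]

theorem pvSlice_eq (vs : List Int) (a b : Int) (ha : 0 ≤ a) (hb0 : 0 ≤ b)
    (hb : b ≤ (vs.length : Int)) :
    PySem.List.slice vs (some a) (some b) = pvMapV vs a b := by
  rw [PySem.List.slice_toNat vs ha hb0]
  apply List.ext_getElem
  · simp [pvMapV, PySem.List.length_pyRange_one]; omega
  · intro i h1 h2
    simp only [pvMapV, List.getElem_take, List.getElem_drop, List.getElem_map,
      PySem.List.getElem_pyRange_one]
    rw [PySem.List.pyGetD_eq_getElem vs 0 (by omega)]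
    · congr 1
      simp [pvMapV, PySem.List.length_pyRange_one] at h2
      omega
    · simp [pvMapV, PySem.List.length_pyRange_one] at h2
      omega

theorem pvModify_last (A : List (List Int)) (y : List Int) (f : List Int → List Int) :
    (A ++ [y]).modify A.length f = A ++ [f y] := by
  apply List.ext_getElem
  · simp
  · intro i h1 h2
    rw [List.getElem_modify]
    by_cases hi : A.length = i
    · subst hi; simp
    · simp at h2
      rw [if_neg hi, List.getElem_append, List.getElem_append]
      split <;> [rfl; (simp_all; omega)]

theorem pvModify_append_left (A B : List (List Int)) (i : Nat) (f : List Int → List Int)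
    (h : i < A.length) : (A ++ B).modify i f = A.modify i f ++ B := by
  apply List.ext_getElem
  · simp
  · intro j h1 h2
    simp only [List.getElem_modify, List.getElem_append, List.length_modify]
    split_ifs <;> simp_all

theorem pvRange_toNat (w : Int) :
    PySem.List.pyRange 0 w 1 = PySem.List.pyRange 0 ((w.toNat : Int)) 1 := by
  have h : (w - 0).toNat = ((w.toNat : Int) - 0).toNat := by omega
  rw [PySem.List.pyRange_one, PySem.List.pyRange_one, h]

-- the inner loop of A's windowed branch: forward neighbors go to the freshly appended last
-- row, wrap-around neighbors are appended to the earlier row i+j+1-n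
theorem pvInner (vs : List Int) (n w I : Int) (hn : n = (vs.length : Int))
    (hI0 : 0 ≤ I) (hIn : I < n) (hw : 2 * w + 1 < n) :
    ∀ (u : Nat), ((u : Int) ≤ w ∨ u = 0) →
    (PySem.List.pyRange 0 (u : Int) 1).foldl (fun rows j =>
        if I + j + 1 < n then
          pvAppendAt rows I (PySem.List.pyGetD vs (I + j + 1) 0)
        else
          pvAppendAt rows (PySem.Int.mod (I + j + 1) n) (PySem.List.pyGetD vs I 0))
      ((PySem.List.pyRange 0 I 1).map (fun r => pvRow vs n w r I) ++ [[PySem.List.pyGetD vs I 0]])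
    = (PySem.List.pyRange 0 I 1).map (fun r =>
        pvRow vs n w r I ++ (if r ≤ I + (u : Int) - n then [PySem.List.pyGetD vs I 0] else []))
      ++ [PySem.List.pyGetD vs I 0 :: pvMapV vs (I + 1) (min (I + (u : Int) + 1) n)] := by
  intro u
  induction u with
  | zero =>
    intro _
    rw [show PySem.List.pyRange (0:Int) (((0:Nat):Int)) 1 = [] from
      PySem.List.pyRange_one_eq_nil (by simp)]
    simp only [List.foldl_nil]
    congr 1
    · apply List.map_congr_left
      intro r hr
      rw [PySem.List.mem_pyRange_one] at hr
      rw [if_neg (by omega), List.append_nil]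
    · rw [pvMapV_empty vs (by omega)]
  | succ u ih =>
    intro hu
    have hu' : (u : Int) + 1 ≤ w := by
      rcases hu with h | h
      · push_cast at h; omega
      · omega
    push_cast
    rw [PySem.List.pyRange_one_succ_right (by positivity), List.foldl_append, List.foldl_cons,
      List.foldl_nil, ih (by omega)]
    have hlenmap : ((PySem.List.pyRange 0 I 1).map (fun r =>
        pvRow vs n w r I ++ (if r ≤ I + (u : Int) - n then [PySem.List.pyGetD vs I 0] else []))).length
        = I.toNat := by
      simp [PySem.List.length_pyRange_one]
    by_cases hk : I + (u : Int) + 1 < n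
    · -- forward append to the last row
      rw [if_pos hk]
      unfold pvAppendAt
      have hIt : I.toNat = ((PySem.List.pyRange 0 I 1).map (fun r =>
        pvRow vs n w r I ++ (if r ≤ I + (u : Int) - n then [PySem.List.pyGetD vs I 0] else []))).length := hlenmap.symm
      rw [hIt, pvModify_last]
      congr 1
      · apply List.map_congr_left
        intro r hr
        rw [PySem.List.mem_pyRange_one] at hr
        rw [if_neg (show ¬ (r ≤ I + (u : Int) - n) by omega)]
        rw [if_neg (show ¬ (r ≤ I + ((u : Int) + 1) - n) by omega)]
      · have h1 : min (I + (u : Int) + 1) n = I + (u : Int) + 1 := by omega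
        have h2 : min (I + ((u : Int) + 1) + 1) n = I + (u : Int) + 1 + 1 := by omega
        rw [h1, h2]
        conv_rhs => rw [pvMapV_snoc vs (show I + 1 ≤ I + ↑u + 1 by omega)]
        simp
    · -- wrap-around append to row I + u + 1 - n
      rw [if_neg hk]
      have hnpos : (0 : Int) < n := by omega
      have hmod : PySem.Int.mod (I + (u : Int) + 1) n = I + (u : Int) + 1 - n := by
        rw [PySem.Int.mod_eq_emod_of_pos hnpos,
          show I + (u : Int) + 1 = (I + (u : Int) + 1 - n) + n * 1 by ring,
          Int.add_mul_emod_self_left, Int.emod_eq_of_lt (by omega) (by omega)]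
        ring
      rw [hmod]
      unfold pvAppendAt
      have ht0 : (0 : Int) ≤ I + (u : Int) + 1 - n := by omega
      have htI : I + (u : Int) + 1 - n < I := by omega
      rw [pvModify_append_left _ _ _ _ (by rw [hlenmap]; omega)]
      congr 1
      · apply List.ext_getElem
        · simp
        · intro p hp1 hp2
          rw [List.getElem_modify]
          simp only [List.getElem_map, PySem.List.getElem_pyRange_one]
          simp only [List.length_map, PySem.List.length_pyRange_one] at hp2
          by_cases hpt : (I + (u : Int) + 1 - n).toNat = p
          · rw [if_pos hpt]
            have hpe : (0 : Int) + (p : Int) = I + (u : Int) + 1 - n := by omega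
            rw [hpe]
            rw [if_neg (by omega), if_pos (by omega)]
            simp
          · rw [if_neg hpt]
            have hne : (0 : Int) + (p : Int) ≠ I + (u : Int) + 1 - n := by omega
            by_cases hle : (0 : Int) + (p : Int) ≤ I + (u : Int) - n
            · rw [if_pos hle, if_pos (by omega)]
            · rw [if_neg hle, if_neg (by omega)]
      · have h1 : min (I + (u : Int) + 1) n = n := by omega
        have h2 : min (I + ((u : Int) + 1) + 1) n = n := by omega
        rw [h1, h2]

-- the outer loop of A's windowed branch produces exactly the closed-form rows
theorem pvOuter (vs : List Int) (n w : Int) (hn : n = (vs.length : Int)) (hw : 2 * w + 1 < n) :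
    ∀ (I : Nat), (I : Int) ≤ n →
    (PySem.List.pyRange 0 (I : Int) 1).foldl (fun rows i =>
        (PySem.List.pyRange 0 w 1).foldl (fun rows j =>
          if i + j + 1 < n then
            pvAppendAt rows i (PySem.List.pyGetD vs (i + j + 1) 0)
          else
            pvAppendAt rows (PySem.Int.mod (i + j + 1) n) (PySem.List.pyGetD vs i 0))
          (rows ++ [[PySem.List.pyGetD vs i 0]])) []
    = (PySem.List.pyRange 0 (I : Int) 1).map (fun r => pvRow vs n w r (I : Int)) := by
  intro I
  induction I with
  | zero =>
    intro _
    rw [show PySem.List.pyRange (0:Int) (((0:Nat):Int)) 1 = [] from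
      PySem.List.pyRange_one_eq_nil (by simp)]
    simp
  | succ I ih =>
    intro hI
    push_cast
    push_cast at hI
    rw [PySem.List.pyRange_one_succ_right (by positivity), List.foldl_append, List.foldl_cons,
      List.foldl_nil, ih (by omega), pvRange_toNat w,
      pvInner vs n w (I : Int) hn (by positivity) (by omega) hw w.toNat (by omega),
      List.map_append]
    congr 1
    · apply List.map_congr_left
      intro r hr
      rw [PySem.List.mem_pyRange_one] at hr
      unfold pvRow
      by_cases hc : n + r - w ≤ (I : Int)
      · rw [if_pos (show r ≤ (I : Int) + (w.toNat : Int) - n by omega),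
          pvMapV_snoc vs hc]
        simp
      · rw [if_neg (show ¬ (r ≤ (I : Int) + (w.toNat : Int) - n) by omega),
          pvMapV_congr vs (show ((I : Int) + 1 - (n + r - w)).toNat = ((I : Int) - (n + r - w)).toNat by omega)]
        simp
    · unfold pvRow
      simp only [List.map_cons, List.map_nil]
      rw [pvMapV_empty vs (show (I : Int) + 1 ≤ n + (I : Int) - w by omega),
        pvMapV_congr vs (show (min ((I : Int) + (w.toNat : Int) + 1) n - ((I : Int) + 1)).toNat
          = (min ((I : Int) + w + 1) n - ((I : Int) + 1)).toNat by omega)]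
      simp

theorem pvExhaustive (vs : List Int) :
    (PySem.List.pyRange 0 (vs.length : Int) 1).map (fun j =>
      (PySem.List.pyRange j (vs.length : Int) 1).map (fun i => PySem.List.pyGetD vs i 0))
    = (PySem.List.pyRange 0 (vs.length : Int) 1).map (fun j => PySem.List.slice vs (some j) none) := by
  apply List.map_congr_left
  intro j hj
  rw [PySem.List.mem_pyRange_one] at hj
  rw [PySem.List.slice_from vs hj.1, PySem.List.map_pyGetD_pyRange' vs 0 hj.1]

theorem pvMainEq (vs : List Int) (wr : Option Int) :
    make_pairs_sequential_loop_py vs wr = make_pairs_sequential_loop_py_alt vs wr := by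
  unfold make_pairs_sequential_loop_py make_pairs_sequential_loop_py_alt
  cases wr with
  | none =>
    simp only [reduceIte]
    rw [pvExhaustive]
  | some w =>
    by_cases hcond : 2 * w + 1 ≥ (vs.length : Int)
    · simp only [ge_iff_le, hcond, decide_true, reduceIte]
      rw [pvExhaustive]
    · simp only [ge_iff_le, hcond, decide_false, Bool.false_eq_true, if_false, Option.getD_some]
      congr 1
      rw [pvOuter vs (vs.length : Int) w rfl (by omega) vs.length le_rfl,
        PySem.List.foldl_append_singleton_eq_map
          (fun r => [PySem.List.pyGetD vs r 0]
            ++ PySem.List.slice vs (some (r + 1)) (some (r + 1 + max 0 (min w ((vs.length : Int) - 1 - r))))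
            ++ (if r < w then PySem.List.slice vs (some ((vs.length : Int) - (w - r))) (some (vs.length : Int)) else []))]
      simp only [List.nil_append]
      apply List.map_congr_left
      intro r hr
      rw [PySem.List.mem_pyRange_one] at hr
      unfold pvRow
      rw [pvSlice_eq vs _ _ (by omega) (by omega) (by omega),
        pvMapV_congr vs (show (r + 1 + max 0 (min w ((vs.length : Int) - 1 - r)) - (r + 1)).toNat
          = (min (r + w + 1) (vs.length : Int) - (r + 1)).toNat by omega)]
      by_cases hrw : r < w
      · rw [if_pos hrw, pvSlice_eq vs _ _ (by omega) (by omega) (by omega),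
          show (vs.length : Int) - (w - r) = (vs.length : Int) + r - w by ring]
        simp
      · rw [if_neg hrw, pvMapV_empty vs (show (vs.length : Int) ≤ (vs.length : Int) + r - w by omega)]
        simp

-- ===== VERDICT (by name: the statement is the Claim_ definition above) =====
theorem make_pairs_sequential_loop_py_spec : Claim_equal_make_pairs_sequential_loop_py := by
  intro view_ids window_radius _
  unfold Spec_make_pairs_sequential_loop_py
  exact pvMainEq view_ids window_radius
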